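-- pv_equiv track=rewrite | github.com/tbengtsen/protein_dynamics | scripts/get_data_split.py | get_data_split
-- ===== SOURCE A (Python) =====
-- def get_data_split (split_ingraham:list,
--                     sim:list,
--                     freq:int,
--                     incl_orig_pdb = True):
--
--     '''
--     Split the pdbs which have been simulated after the Ingraham data split.
--     Returns dictionary with splits both for frames in simulations and one
--     for the corresponding single pdb structures to compare with.
--     '''
--
--     split_simulations = []
--     split_orig_pdbs = []
--
--     for pdb_chain in split_ingraham : # uses split ingraham to get chains as well as pdb id
--         pdb = pdb_chain.split('.')[0]
--
--         if pdb in sim: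
--
--             # add pdb to single_reference like so: pdb.chain
--             split_orig_pdbs.append(pdb_chain)
--
--             ## add sim frames to pdb+chain like so: pdb.chain.frame
--
--             # append original pdb denoted -1
--             if incl_orig_pdb:
--                 pdb_frame = pdb_chain + '.-1'
--                 split_simulations.append(pdb_frame)
--
--             # append first frame in sim = 50 ps
--             # as did not save sim starting structure (the one after equil)
--             if freq !=50:
--                 pdb_frame = pdb_chain + f'.50'
--                 split_simulations.append(pdb_frame)
--
--             # append all rest frames in structure with freq intervals
--             for frame in range(freq, 20000, freq): # pick out frames with freq up to 20ns
--                 pdb_frame = pdb_chain + f'.{frame}'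
--                 split_simulations.append(pdb_frame)
--
--             # append last frame (19950ps) - bc frame 20000ps not saved in sim
--             pdb_frame = pdb_chain + f'.19950'
--             split_simulations.append(pdb_frame)
--
--
--     return split_simulations, split_orig_pdbs
-- ===== SOURCE B (Python) =====
-- def get_data_split(split_ingraham: list,
--                    sim: list,
--                    freq: int,
--                    incl_orig_pdb=True):
--     members = frozenset(sim)
--     split_orig_pdbs = [c for c in split_ingraham if c.split('.')[0] in members]
--     if not split_orig_pdbs:
--         return [], []
--     frames = ([-1] if incl_orig_pdb else []) \
--            + ([50] if freq != 50 else []) \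
--            + list(range(freq, 20000, freq)) \
--            + [19950]
--     k = len(frames)
--     split_simulations = [f"{split_orig_pdbs[i // k]}.{frames[i % k]}"
--                          for i in range(len(split_orig_pdbs) * k)]
--     return split_simulations, split_orig_pdbs
-- ===== Notes on version B (the rewrite author's own statement) =====
-- stated objective: alternative
-- what changed: Replaces A's nested accumulator loop (which re-derives the frame-suffix strings inside every matching chain's iteration) by three staged passes: filter the matching chains, build one numeric frame list, then produce all frame strings in a single flat loop over n*k indices using divmod to pick chain and frame.
import Mathlib
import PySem

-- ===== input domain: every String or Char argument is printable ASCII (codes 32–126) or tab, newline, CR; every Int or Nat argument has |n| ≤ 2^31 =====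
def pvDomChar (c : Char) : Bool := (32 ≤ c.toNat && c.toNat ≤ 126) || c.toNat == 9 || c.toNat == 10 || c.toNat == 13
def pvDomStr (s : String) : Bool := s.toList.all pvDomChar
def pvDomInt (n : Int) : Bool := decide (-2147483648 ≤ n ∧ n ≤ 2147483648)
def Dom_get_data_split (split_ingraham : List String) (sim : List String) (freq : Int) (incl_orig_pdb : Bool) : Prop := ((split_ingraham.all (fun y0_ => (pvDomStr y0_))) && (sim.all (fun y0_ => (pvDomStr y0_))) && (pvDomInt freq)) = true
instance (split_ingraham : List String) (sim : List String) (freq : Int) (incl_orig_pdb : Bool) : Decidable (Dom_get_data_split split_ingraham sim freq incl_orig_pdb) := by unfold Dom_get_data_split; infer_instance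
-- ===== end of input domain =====

-- B replaces A's nested accumulator loop (re-deriving the frame suffixes chain by chain) by a filter
-- for the matching chains, one numeric frame list, and a single flat index loop using divmod (simpler).

-- shared primitive helper: pdb_chain.split('.')[0] (split? is some since sep ≠ ""; index 0 always exists)
def pvPdbOf (c : String) : String := ((PySem.Str.split? c ".").getD []).headD ""

-- ===== PORT A =====
def get_data_split (split_ingraham : List String) (sim : List String) (freq : Int) (incl_orig_pdb : Bool) : List String × List String :=
  split_ingraham.foldl (fun acc pdb_chain =>
    let pdb := pvPdbOf pdb_chain
    if sim.contains pdb then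
      let split_orig_pdbs := acc.2 ++ [pdb_chain]
      let sims := acc.1
      let sims := if incl_orig_pdb then sims ++ [pdb_chain ++ ".-1"] else sims
      let sims := if freq ≠ 50 then sims ++ [pdb_chain ++ ".50"] else sims
      let sims := (PySem.List.pyRange freq 20000 freq).foldl
        (fun s frame => s ++ [pdb_chain ++ ("." ++ PySem.Int.toStr frame)]) sims
      let sims := sims ++ [pdb_chain ++ ".19950"]
      (sims, split_orig_pdbs)
    else acc) ([], [])

-- ===== PORT B =====
def get_data_split_alt (split_ingraham : List String) (sim : List String) (freq : Int) (incl_orig_pdb : Bool) : List String × List String :=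
  let members := PySem.Set.ofList sim
  let split_orig_pdbs := split_ingraham.filter
    (fun c => PySem.Set.contains members (pvPdbOf c))
  if split_orig_pdbs = [] then ([], [])
  else
    let frames : List Int :=
      (if incl_orig_pdb then [-1] else [])
      ++ (if freq ≠ 50 then [50] else [])
      ++ PySem.List.pyRange freq 20000 freq
      ++ [19950]
    let k : Int := PySem.List.len frames
    let split_simulations :=
      (PySem.List.pyRange 0 (PySem.List.len split_orig_pdbs * k) 1).map
        (fun i => PySem.List.pyGetD split_orig_pdbs (PySem.Int.floordiv i k) ""
                  ++ ("." ++ PySem.Int.toStr (PySem.List.pyGetD frames (PySem.Int.mod i k) 0)))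
    (split_simulations, split_orig_pdbs)

-- ===== PRECONDITION & SPEC =====
-- Pre_ excludes exactly the inputs where Python A raises ValueError (range step 0): freq = 0 while
-- some chain's prefix before '.' is in sim; B raises the same ValueError there.
def Pre_get_data_split (split_ingraham : List String) (sim : List String) (freq : Int) (incl_orig_pdb : Bool) : Prop :=
  freq ≠ 0 ∨ ∀ c ∈ split_ingraham, ¬ sim.contains (pvPdbOf c)
instance (split_ingraham : List String) (sim : List String) (freq : Int) (incl_orig_pdb : Bool) : Decidable (Pre_get_data_split split_ingraham sim freq incl_orig_pdb) := by unfold Pre_get_data_split; infer_instance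

def pvWitness_get_data_split : List String × List String × Int × Bool :=
  (["1abc.A", "2xyz.B"], ["1abc"], 7000, true)

def Spec_get_data_split (split_ingraham : List String) (sim : List String) (freq : Int) (incl_orig_pdb : Bool) (out : List String × List String) : Prop := out = get_data_split_alt split_ingraham sim freq incl_orig_pdb
instance (split_ingraham : List String) (sim : List String) (freq : Int) (incl_orig_pdb : Bool) (out : List String × List String) : Decidable (Spec_get_data_split split_ingraham sim freq incl_orig_pdb out) := by unfold Spec_get_data_split; infer_instance

-- ===== CLAIM (what is proved, stated in full; the proofs are below) =====
def Claim_equal_get_data_split : Prop := ∀ (split_ingraham : List String) (sim : List String) (freq : Int) (incl_orig_pdb : Bool), Dom_get_data_split split_ingraham sim freq incl_orig_pdb → Pre_get_data_split split_ingraham sim freq incl_orig_pdb → Spec_get_data_split split_ingraham sim freq incl_orig_pdb (get_data_split split_ingraham sim freq incl_orig_pdb)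

-- ===== LEMMAS AND PROOFS =====

-- B's numeric frame list
def pvFrames (freq : Int) (incl : Bool) : List Int :=
  (if incl then [-1] else [])
  ++ (if freq ≠ 50 then [50] else [])
  ++ PySem.List.pyRange freq 20000 freq
  ++ [19950]

lemma pvFrames_ne_nil (freq : Int) (incl : Bool) : pvFrames freq incl ≠ [] := by
  unfold pvFrames; simp

-- the block of frame strings A appends for one matching chain is the chain paired with pvFrames
lemma pvBlock_eq (c : String) (freq : Int) (incl : Bool) (sims : List String) :
    ((PySem.List.pyRange freq 20000 freq).foldl
        (fun s frame => s ++ [c ++ ("." ++ PySem.Int.toStr frame)])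
        (if freq ≠ 50 then (if incl then sims ++ [c ++ ".-1"] else sims) ++ [c ++ ".50"]
         else (if incl then sims ++ [c ++ ".-1"] else sims)))
      ++ [c ++ ".19950"]
      = sims ++ (pvFrames freq incl).map (fun f => c ++ ("." ++ PySem.Int.toStr f)) := by
  rw [PySem.List.foldl_append_singleton_eq_map]
  have e1 : ("." ++ PySem.Int.toStr (-1) : String) = ".-1" := by decide
  have e2 : ("." ++ PySem.Int.toStr 50 : String) = ".50" := by decide
  have e3 : ("." ++ PySem.Int.toStr 19950 : String) = ".19950" := by decide
  unfold pvFrames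
  split_ifs <;> simp [List.map_append, e1, e2, e3, List.append_assoc]

-- A's whole fold, characterised
lemma pvFoldA (sim : List String) (freq : Int) (incl : Bool) :
    ∀ (l : List String) (acc : List String × List String),
      l.foldl (fun acc pdb_chain =>
        let pdb := pvPdbOf pdb_chain
        if sim.contains pdb then
          let split_orig_pdbs := acc.2 ++ [pdb_chain]
          let sims := acc.1
          let sims := if incl then sims ++ [pdb_chain ++ ".-1"] else sims
          let sims := if freq ≠ 50 then sims ++ [pdb_chain ++ ".50"] else sims
          let sims := (PySem.List.pyRange freq 20000 freq).foldl
            (fun s frame => s ++ [pdb_chain ++ ("." ++ PySem.Int.toStr frame)]) sims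
          let sims := sims ++ [pdb_chain ++ ".19950"]
          (sims, split_orig_pdbs)
        else acc) acc
      = (acc.1 ++ (l.filter (fun c => sim.contains (pvPdbOf c))).flatMap
            (fun c => (pvFrames freq incl).map (fun f => c ++ ("." ++ PySem.Int.toStr f))),
         acc.2 ++ l.filter (fun c => sim.contains (pvPdbOf c))) := by
  intro l
  induction l with
  | nil => intro acc; simp
  | cons c tl ih =>
    intro acc
    simp only [List.foldl_cons, List.filter_cons]
    by_cases h : sim.contains (pvPdbOf c) = true
    · rw [ih]
      have hb := pvBlock_eq c freq incl acc.1
      simp only [h, if_true, List.flatMap_cons]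
      rw [hb]
      simp [List.append_assoc]
    · simp only [h]
      rw [ih]
      simp

-- the flat divmod index loop is the nested product, over Nat indices
lemma pvFlatIndex {α γ : Type} (g : α → γ → String) (dx : α) (dy : γ) :
    ∀ (xs : List α) (ys : List γ), ys ≠ [] →
      (List.range (xs.length * ys.length)).map
        (fun i => g (xs.getD (i / ys.length) dx) (ys.getD (i % ys.length) dy))
      = xs.flatMap (fun a => ys.map (fun b => g a b)) := by
  intro xs
  induction xs with
  | nil => intro ys _; simp
  | cons a tl ih =>
    intro ys hy
    have hK : 0 < ys.length := List.length_pos_iff.mpr hy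
    have hlen : (a :: tl).length * ys.length = ys.length + tl.length * ys.length := by
      simp [Nat.succ_mul, Nat.add_comm]
    rw [hlen, List.range_add, List.map_append, List.map_map]
    congr 1
    · apply List.ext_getElem (by simp)
      intro i h1 h2
      simp only [List.getElem_map, List.getElem_range]
      have hi : i < ys.length := by simpa using h1
      rw [Nat.div_eq_of_lt hi, Nat.mod_eq_of_lt hi]
      simp [List.getElem?_eq_getElem hi]
    · have h2 := ih ys hy
      simp only [List.flatMap] at h2
      rw [← h2]
      apply List.map_congr_left
      intro x _
      simp only [Function.comp_apply]
      rw [Nat.add_comm ys.length x, Nat.add_div_right _ hK, Nat.add_mod_right]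
      simp

lemma pvSetFilter (sim : List String) (si : List String) :
    si.filter (fun c => PySem.Set.contains (PySem.Set.ofList sim) (pvPdbOf c))
      = si.filter (fun c => sim.contains (pvPdbOf c)) := by
  apply List.filter_congr
  intro c _
  simp [PySem.Set.contains]

-- B's flat index comprehension, characterised
lemma pvMapB (M : List String) (freq : Int) (incl : Bool) :
    (PySem.List.pyRange 0 (PySem.List.len M * PySem.List.len (pvFrames freq incl)) 1).map
      (fun i => PySem.List.pyGetD M (PySem.Int.floordiv i (PySem.List.len (pvFrames freq incl))) ""
                ++ ("." ++ PySem.Int.toStr (PySem.List.pyGetD (pvFrames freq incl) (PySem.Int.mod i (PySem.List.len (pvFrames freq incl))) 0)))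
    = M.flatMap (fun c => (pvFrames freq incl).map (fun f => c ++ ("." ++ PySem.Int.toStr f))) := by
  have hcast : PySem.List.len M * PySem.List.len (pvFrames freq incl)
      = ((M.length * (pvFrames freq incl).length : Nat) : Int) := by
    simp [PySem.List.len_eq]
  rw [hcast, PySem.List.pyRange_zero_natCast, List.map_map]
  rw [← pvFlatIndex (fun a b => a ++ ("." ++ PySem.Int.toStr b)) "" 0 M (pvFrames freq incl) (pvFrames_ne_nil freq incl)]
  apply List.map_congr_left
  intro j _
  simp only [Function.comp_apply, PySem.List.len_eq, PySem.Int.floordiv_natCast, PySem.Int.mod_natCast,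
    PySem.List.pyGetD_natCast]

-- ===== VERDICT (by name: the statement is the Claim_ definition above) =====
theorem get_data_split_spec : Claim_equal_get_data_split := by
  intro si sim freq incl _ _
  unfold Spec_get_data_split get_data_split get_data_split_alt
  rw [pvFoldA]
  simp only [pvSetFilter]
  by_cases hMe : si.filter (fun c => sim.contains (pvPdbOf c)) = []
  · rw [hMe]
    simp
  · simp only [if_neg hMe]
    rw [show ((if incl then [(-1 : Int)] else [])
      ++ (if freq ≠ 50 then [(50 : Int)] else [])
      ++ PySem.List.pyRange freq 20000 freq
      ++ [19950]) = pvFrames freq incl from rfl]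
    rw [pvMapB]
    simp
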